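-- pv_equiv track=rewrite | github.com/AlyScript/rvos | etok/objdump_to_kmd/translation.py | data_to_kmd
-- ===== SOURCE A (Python) =====
-- def data_to_kmd(address: int, data_string: str):
--     # Split data into bytes: Will merge these into words later
--     # split_bytes = [data_string[n:n+2] for n in range(0, len(data_string), 2)][::1]
--     # out = []
--     # for i, byte in enumerate(split_bytes):
--     #     current_address = address + i
--     #     kmd_line = f"{str(hex(current_address))[2:].rjust(8, '0')}: {byte} ;"
--     #     if current_address % 4 != 0: out += [f"\t{kmd_line}"]
--     #     else: out += [f"{kmd_line}"]
--
--     if len(data_string) > 4: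
--         if len(data_string) == 8 and address % 4 == 0:
--             pass  # Ignore word aligned words: Thats ok!
--         else:
--             if len(data_string) % 4 != 0:
--                 raise Exception(f"Invalid insn {data_string} at {hex(address)}")
--
--             # Split into shorts
--             shorts = [data_string[n : n + 4] for n in range(0, len(data_string), 4)]
--             out = []
--             for i, short in enumerate(shorts[::-1]):
--                 current_address = address + (i * 2)
--                 out.extend(data_to_kmd(current_address, short))
--
--             return out
--
--     return [f"{str(hex(address))[2:].rjust(8, '0')}: {data_string} ;"]
-- ===== SOURCE B (Python) =====
-- def data_to_kmd(address: int, data_string: str):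
--     # Iterative re-implementation: no recursion; format each 4-char short directly.
--     n = len(data_string)
--     if n <= 4 or (n == 8 and address % 4 == 0):
--         return [f"{str(hex(address))[2:].rjust(8, '0')}: {data_string} ;"]
--     if n % 4 != 0:
--         raise Exception(f"Invalid insn {data_string} at {hex(address)}")
--     shorts = [data_string[k : k + 4] for k in range(0, n, 4)]
--     return [
--         f"{str(hex(address + i * 2))[2:].rjust(8, '0')}: {short} ;"
--         for i, short in enumerate(reversed(shorts))
--     ]
-- ===== Notes on version B (the rewrite author's own statement) =====
-- stated objective: simpler
-- what changed: A recurses on each 4-char short (the recursion only ever reaching its own base case); B is fully iterative, formatting each short of the reversed split directly in one list comprehension. Pre_ excludes the inputs on which A (and B alike) raises its explicit Exception: len>4 and len%4!=0.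
import Mathlib
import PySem

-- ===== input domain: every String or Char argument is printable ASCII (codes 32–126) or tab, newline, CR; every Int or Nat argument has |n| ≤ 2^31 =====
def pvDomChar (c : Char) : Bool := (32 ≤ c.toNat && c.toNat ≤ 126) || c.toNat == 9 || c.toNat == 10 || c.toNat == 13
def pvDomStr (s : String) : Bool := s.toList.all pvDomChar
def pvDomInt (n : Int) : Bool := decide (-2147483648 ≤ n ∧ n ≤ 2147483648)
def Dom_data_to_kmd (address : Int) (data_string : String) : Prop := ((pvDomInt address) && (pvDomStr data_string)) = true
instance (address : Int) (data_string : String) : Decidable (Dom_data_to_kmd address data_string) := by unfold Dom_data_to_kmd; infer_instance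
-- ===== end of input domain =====

-- B replaces A's self-recursion (whose inner calls only ever hit the base case) by a single
-- iterative pass that formats each 4-char short directly; objective: simpler.


-- ===== PORT A =====
-- f"{str(hex(address))[2:].rjust(8, '0')}: {data} ;"  — shared by both Pythons verbatim.
-- hex(n)[2:] is the hex digits for n ≥ 0 and 'x' ++ digits of |n| for n < 0 (exact on Dom).
def kmdLine (address : Int) (data : List Char) : String :=
  let h : List Char :=
    if address < 0 then 'x' :: Nat.toDigits 16 (-address).toNat
    else Nat.toDigits 16 address.toNat
  String.ofList (List.replicate (8 - h.length) '0' ++ h ++ (':' :: ' ' :: data) ++ [' ', ';'])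

-- membership in the shorts list bounds the short's length by 4 (used for termination and the proof)
theorem shorts_mem_len_le (cs : List Char) (p : Int × List Char)
    (hp : p ∈ PySem.List.enumerate
      (((PySem.List.pyRange 0 (cs.length : Int) 4).map
        (fun n => PySem.List.slice cs (some n) (some (n + 4)))).reverse) 0) :
    p.2.length ≤ 4 := by
  have h2 : p.2 ∈ ((PySem.List.pyRange 0 (cs.length : Int) 4).map
      (fun n => PySem.List.slice cs (some n) (some (n + 4)))).reverse := by
    rcases (PySem.List.mem_enumerate_iff _ _ _).1 hp with ⟨k, hk, rfl⟩
    exact List.getElem_mem _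
  rw [List.mem_reverse, List.mem_map] at h2
  rcases h2 with ⟨n, hn, hs⟩
  have hn0 : 0 ≤ n := ((PySem.List.mem_pyRange_iff_of_pos (by norm_num : (0:Int) < 4) n).1 hn).1
  obtain ⟨m, rfl⟩ := Int.eq_ofNat_of_zero_le hn0
  have : ((m : Int) + 4) = ((m : Int) + ((4 : Nat) : Int)) := by push_cast; ring
  rw [← hs, this, PySem.List.slice_natCast_add]
  simp

-- transliteration of A (the 'raise' branch is excluded by Pre_ and ports to [])
def data_to_kmd_chars (address : Int) (cs : List Char) : List String :=
  if cs.length > 4 then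
    if cs.length = 8 ∧ address % 4 = 0 then
      [kmdLine address cs]
    else
      if cs.length % 4 ≠ 0 then []  -- raise Exception(...)
      else
        let shorts := (PySem.List.pyRange 0 (cs.length : Int) 4).map
          (fun n => PySem.List.slice cs (some n) (some (n + 4)))
        (PySem.List.enumerate shorts.reverse 0).attach.foldl
          (fun out p => out ++ data_to_kmd_chars (address + p.1.1 * 2) p.1.2) []
  else
    [kmdLine address cs]
termination_by cs.length
decreasing_by
  exact lt_of_le_of_lt (shorts_mem_len_le cs p.1 p.2) (by omega)

def data_to_kmd (address : Int) (data_string : String) : List String :=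
  data_to_kmd_chars address data_string.toList

-- ===== PORT B =====
def data_to_kmd_alt (address : Int) (data_string : String) : List String :=
  let cs := data_string.toList
  let n := cs.length
  if n ≤ 4 ∨ (n = 8 ∧ address % 4 = 0) then
    [kmdLine address cs]
  else if n % 4 ≠ 0 then []  -- raise Exception(...)
  else
    let shorts := (PySem.List.pyRange 0 (n : Int) 4).map
      (fun k => PySem.List.slice cs (some k) (some (k + 4)))
    (PySem.List.enumerate shorts.reverse 0).map
      (fun p => kmdLine (address + p.1 * 2) p.2)

-- ===== PRECONDITION & SPEC =====
-- Pre_ excludes exactly the inputs where A raises its explicit Exception: length > 4 and not a multiple of 4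
def Pre_data_to_kmd (address : Int) (data_string : String) : Prop :=
  data_string.toList.length ≤ 4 ∨ data_string.toList.length % 4 = 0
instance (address : Int) (data_string : String) : Decidable (Pre_data_to_kmd address data_string) := by unfold Pre_data_to_kmd; infer_instance
def pvWitness_data_to_kmd : Int × String := (257, "deadbeef")

def Spec_data_to_kmd (address : Int) (data_string : String) (out : List String) : Prop := out = data_to_kmd_alt address data_string
instance (address : Int) (data_string : String) (out : List String) : Decidable (Spec_data_to_kmd address data_string out) := by unfold Spec_data_to_kmd; infer_instance

-- ===== CLAIM (what is proved, stated in full; the proofs are below) =====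
def Claim_equal_data_to_kmd : Prop := ∀ (address : Int) (data_string : String), Dom_data_to_kmd address data_string → Pre_data_to_kmd address data_string → Spec_data_to_kmd address data_string (data_to_kmd address data_string)

-- ===== LEMMAS AND PROOFS =====

theorem data_to_kmd_chars_base (address : Int) (cs : List Char) (h : cs.length ≤ 4) :
    data_to_kmd_chars address cs = [kmdLine address cs] := by
  rw [data_to_kmd_chars]
  simp [Nat.not_lt.2 h]

theorem foldl_attach_append (l : List (Int × List Char)) (g : Int × List Char → List String)
    (f : Int × List Char → String) (h : ∀ p ∈ l, g p = [f p]) (acc : List String) :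
    l.attach.foldl (fun out p => out ++ g p.1) acc = acc ++ l.map f := by
  induction l generalizing acc with
  | nil => simp
  | cons x xs ih =>
    rw [List.attach_cons, List.foldl_cons, List.foldl_map]
    show List.foldl (fun (out : List String) (p : {a // a ∈ xs}) => out ++ g p.1) (acc ++ g x) xs.attach = acc ++ List.map f (x :: xs)
    rw [List.map_cons]
    rw [h x List.mem_cons_self, ih (fun p hp => h p (List.mem_cons_of_mem _ hp)) (acc ++ [f x])]
    simp

-- ===== VERDICT (by name: the statement is the Claim_ definition above) =====
theorem data_to_kmd_spec : Claim_equal_data_to_kmd := by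
  intro address s _hDom hPre
  unfold Spec_data_to_kmd data_to_kmd data_to_kmd_alt Pre_data_to_kmd at *
  simp only []
  generalize s.toList = cs at hPre ⊢
  by_cases h4 : cs.length ≤ 4
  · rw [data_to_kmd_chars_base address cs h4, if_pos (Or.inl h4)]
  · rcases hPre with h | hmod
    · omega
    by_cases h8 : cs.length = 8 ∧ address % 4 = 0
    · rw [data_to_kmd_chars]
      rw [if_pos (by omega : cs.length > 4), if_pos h8, if_pos (Or.inr h8)]
    · have hneg : ¬(cs.length ≤ 4 ∨ (cs.length = 8 ∧ address % 4 = 0)) := by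
        rintro (h | h)
        · omega
        · exact h8 h
      rw [data_to_kmd_chars]
      rw [if_pos (by omega : cs.length > 4), if_neg h8, if_neg (not_not_intro hmod),
        if_neg hneg, if_neg (not_not_intro hmod)]
      rw [foldl_attach_append _
        (fun p => data_to_kmd_chars (address + p.1 * 2) p.2)
        (fun p => kmdLine (address + p.1 * 2) p.2)
        (fun p hp => data_to_kmd_chars_base (address + p.1 * 2) p.2 (shorts_mem_len_le cs p hp)) []]
      rw [List.nil_append]
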